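-- pv_equiv track=rewrite | github.com/insarlab/MiaplPy | objects/cluster_minopy.py | split_box2sub_boxes_old
-- ===== SOURCE A (Python) =====
-- def split_box2sub_boxes_old(box, range_window, azimuth_window, num_split, dimension='x'):
--     """Divide the input box into `num_split` different sub_boxes.
--
--     :param box: [x0, y0, x1, y1]: list[int] of size 4
--     :param range_window: range window size for shp finding
--     :param azimuth_window: azimuth window size for shp finding
--     :param num_split: int, the number of sub_boxes to split a box into
--     :param dimension: str = 'y' or 'x', the dimension along which to split the boxes
--     :return: sub_boxes: list(list(4 int)), the splited sub boxes
--     """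
--
--     x0, y0, x1, y1 = box
--     length, width = y1 - y0, x1 - x0
--
--     sub_boxes = []
--     if dimension == 'y':
--         if (length // num_split) < (2 * azimuth_window):
--             num_split = length // (2 * azimuth_window)
--         for i in range(num_split):
--             start = (i * length) // num_split + y0
--             end = ((i + 1) * length) // num_split + y0
--             if i == num_split - 1:
--                 end = y1
--             sub_boxes.append([x0, start, x1, end])
--
--     else:
--         if (width // num_split) < (2 * range_window):
--             num_split = width // (2 * range_window)
--         for i in range(num_split):
--             start = (i * width) // num_split + x0
--             end = ((i + 1) * width) // num_split + x0
--             if i == num_split - 1: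
--                 end = x1
--             sub_boxes.append([start, y0, end, y1])
--
--     return sub_boxes
-- ===== SOURCE B (Python) =====
-- def split_box2sub_boxes_old(box, range_window, azimuth_window, num_split, dimension='x'):
--     """Bresenham-style splitter: instead of recomputing start/end from the index
--     with i*size//n, carry a remainder accumulator acc = (i*size) mod n and emit
--     each chunk width incrementally via one divmod; the widths sum to size
--     exactly, so no last-iteration override is needed."""
--     x0, y0, x1, y1 = box
--     along_y = dimension == 'y'
--     if along_y:
--         size, window, start = y1 - y0, azimuth_window, y0
--     else:
--         size, window, start = x1 - x0, range_window, x0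
--     n = num_split
--     if size // n < 2 * window:
--         n = size // (2 * window)
--     sub_boxes = []
--     acc = 0
--     for _ in range(n):
--         acc += size
--         step, acc = divmod(acc, n)
--         end = start + step
--         sub_boxes.append([x0, start, x1, end] if along_y else [start, y0, end, y1])
--         start = end
--     return sub_boxes
-- ===== Notes on version B (the rewrite author's own statement) =====
-- stated objective: alternative
-- what changed: B replaces A's per-index closed-form bounds (start/end recomputed as i*size//n each iteration, plus a last-iteration override) with a Bresenham-style single pass that carries a remainder accumulator and derives each chunk width by one incremental divmod, needing no index arithmetic and no final fix-up.
import Mathlib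
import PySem

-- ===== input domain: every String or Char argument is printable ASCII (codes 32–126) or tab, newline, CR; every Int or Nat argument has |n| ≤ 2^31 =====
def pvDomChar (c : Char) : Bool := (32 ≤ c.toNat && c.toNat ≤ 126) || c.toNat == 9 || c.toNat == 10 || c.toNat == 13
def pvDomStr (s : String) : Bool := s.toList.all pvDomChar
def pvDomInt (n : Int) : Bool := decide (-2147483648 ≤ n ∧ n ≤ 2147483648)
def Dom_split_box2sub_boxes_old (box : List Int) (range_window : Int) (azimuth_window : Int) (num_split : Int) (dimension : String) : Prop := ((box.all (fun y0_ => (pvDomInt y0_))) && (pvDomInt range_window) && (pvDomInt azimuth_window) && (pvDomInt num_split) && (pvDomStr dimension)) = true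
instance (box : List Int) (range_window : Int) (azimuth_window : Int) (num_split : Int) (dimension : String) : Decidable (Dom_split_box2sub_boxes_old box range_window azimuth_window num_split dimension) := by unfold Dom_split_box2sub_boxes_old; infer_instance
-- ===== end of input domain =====

-- B replaces A's per-index i*size//n bound formula (with last-iteration override) by a
-- Bresenham-style remainder-accumulator pass emitting chunk widths incrementally (alternative, same cost).

-- ===== PORT A =====
def split_box2sub_boxes_old (box : List Int) (range_window : Int) (azimuth_window : Int) (num_split : Int) (dimension : String) : List (List Int) :=
  let x0 := PySem.List.pyGetD box 0 0
  let y0 := PySem.List.pyGetD box 1 0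
  let x1 := PySem.List.pyGetD box 2 0
  let y1 := PySem.List.pyGetD box 3 0
  let length := y1 - y0
  let width := x1 - x0
  if dimension = "y" then
    let ns := if PySem.Int.floordiv length num_split < 2 * azimuth_window then
                PySem.Int.floordiv length (2 * azimuth_window) else num_split
    (PySem.List.pyRange 0 ns 1).foldl (fun acc i =>
      let start := PySem.Int.floordiv (i * length) ns + y0
      let end_ := PySem.Int.floordiv ((i + 1) * length) ns + y0
      let end_ := if i = ns - 1 then y1 else end_
      acc ++ [[x0, start, x1, end_]]) []
  else
    let ns := if PySem.Int.floordiv width num_split < 2 * range_window then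
                PySem.Int.floordiv width (2 * range_window) else num_split
    (PySem.List.pyRange 0 ns 1).foldl (fun acc i =>
      let start := PySem.Int.floordiv (i * width) ns + x0
      let end_ := PySem.Int.floordiv ((i + 1) * width) ns + x0
      let end_ := if i = ns - 1 then x1 else end_
      acc ++ [[start, y0, end_, y1]]) []

-- ===== PORT B =====
-- state = (start, acc, sub_boxes); Python's 'step, acc = divmod(acc, n)' is ported as
-- (floordiv, mod), exact since the loop only runs when n > 0.
def split_box2sub_boxes_old_alt (box : List Int) (range_window : Int) (azimuth_window : Int) (num_split : Int) (dimension : String) : List (List Int) :=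
  let x0 := PySem.List.pyGetD box 0 0
  let y0 := PySem.List.pyGetD box 1 0
  let x1 := PySem.List.pyGetD box 2 0
  let y1 := PySem.List.pyGetD box 3 0
  let along_y := dimension == "y"
  let swv : Int × Int × Int :=
    if along_y then (y1 - y0, azimuth_window, y0) else (x1 - x0, range_window, x0)
  let size := swv.1
  let window := swv.2.1
  let start0 := swv.2.2
  let n := if PySem.Int.floordiv size num_split < 2 * window then
             PySem.Int.floordiv size (2 * window) else num_split
  ((PySem.List.pyRange 0 n 1).foldl (fun (st : Int × Int × List (List Int)) (_ : Int) =>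
      let acc := st.2.1 + size
      let step := PySem.Int.floordiv acc n
      let acc := PySem.Int.mod acc n
      let end_ := st.1 + step
      (end_, acc, st.2.2 ++ [if along_y then [x0, st.1, x1, end_] else [st.1, y0, end_, y1]]))
    (start0, 0, [])).2.2

-- ===== PRECONDITION & SPEC =====
-- Pre_ excludes exactly the inputs where A raises: a box whose length is not 4
-- (unpacking raises ValueError), num_split = 0 (ZeroDivisionError in the guard), and a
-- zero window when the shrinking guard fires (ZeroDivisionError in the reassignment).
def Pre_split_box2sub_boxes_old (box : List Int) (range_window : Int) (azimuth_window : Int) (num_split : Int) (dimension : String) : Prop :=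
  box.length = 4 ∧ num_split ≠ 0 ∧
  (dimension = "y" →
    (PySem.Int.floordiv (PySem.List.pyGetD box 3 0 - PySem.List.pyGetD box 1 0) num_split < 2 * azimuth_window →
      azimuth_window ≠ 0)) ∧
  (dimension ≠ "y" →
    (PySem.Int.floordiv (PySem.List.pyGetD box 2 0 - PySem.List.pyGetD box 0 0) num_split < 2 * range_window →
      range_window ≠ 0))
instance (box : List Int) (range_window : Int) (azimuth_window : Int) (num_split : Int) (dimension : String) : Decidable (Pre_split_box2sub_boxes_old box range_window azimuth_window num_split dimension) := by unfold Pre_split_box2sub_boxes_old; infer_instance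

def pvWitness_split_box2sub_boxes_old : List Int × Int × Int × Int × String := ([0, 0, 10, 10], 1, 1, 2, "x")

def Spec_split_box2sub_boxes_old (box : List Int) (range_window : Int) (azimuth_window : Int) (num_split : Int) (dimension : String) (out : List (List Int)) : Prop := out = split_box2sub_boxes_old_alt box range_window azimuth_window num_split dimension
instance (box : List Int) (range_window : Int) (azimuth_window : Int) (num_split : Int) (dimension : String) (out : List (List Int)) : Decidable (Spec_split_box2sub_boxes_old box range_window azimuth_window num_split dimension out) := by unfold Spec_split_box2sub_boxes_old; infer_instance

-- ===== CLAIM (what is proved, stated in full; the proofs are below) =====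
def Claim_equal_split_box2sub_boxes_old : Prop := ∀ (box : List Int) (range_window : Int) (azimuth_window : Int) (num_split : Int) (dimension : String), Dom_split_box2sub_boxes_old box range_window azimuth_window num_split dimension → Pre_split_box2sub_boxes_old box range_window azimuth_window num_split dimension → Spec_split_box2sub_boxes_old box range_window azimuth_window num_split dimension (split_box2sub_boxes_old box range_window azimuth_window num_split dimension)

-- ===== LEMMAS AND PROOFS =====

theorem pv_mod_bounds (a n : Int) (hn : 0 < n) :
    0 ≤ PySem.Int.mod a n ∧ PySem.Int.mod a n < n := by
  have h := (PySem.Int.floordiv_eq_iff_of_pos hn (a := a) (q := PySem.Int.floordiv a n)).mp rfl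
  have h2 := PySem.Int.floordiv_mul_add_mod a n
  constructor <;> nlinarith

theorem floordiv_mul_self (n size : Int) (hn : 0 < n) :
    PySem.Int.floordiv (n * size) n = size := by
  rw [PySem.Int.floordiv_eq_iff_of_pos hn]
  constructor <;> nlinarith

-- the one-step identities behind the remainder accumulator
theorem pv_step_div (size n j : Int) (hn : 0 < n) :
    PySem.Int.floordiv (PySem.Int.mod (j * size) n + size) n
      = PySem.Int.floordiv ((j + 1) * size) n - PySem.Int.floordiv (j * size) n := by
  have h1 := PySem.Int.floordiv_mul_add_mod (j * size) n
  have h2 := PySem.Int.floordiv_mul_add_mod ((j + 1) * size) n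
  have hb := pv_mod_bounds ((j + 1) * size) n hn
  rw [PySem.Int.floordiv_eq_iff_of_pos hn]
  constructor <;> nlinarith

theorem pv_step_mod (size n j : Int) (hn : 0 < n) :
    PySem.Int.mod (PySem.Int.mod (j * size) n + size) n
      = PySem.Int.mod ((j + 1) * size) n := by
  have h1 := PySem.Int.floordiv_mul_add_mod (j * size) n
  have h2 := PySem.Int.floordiv_mul_add_mod ((j + 1) * size) n
  have h3 := PySem.Int.floordiv_mul_add_mod (PySem.Int.mod (j * size) n + size) n
  have h4 := pv_step_div size n j hn
  nlinarith [h1, h2, h3, h4]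

-- A's accumulate loop (override folded away via floordiv_mul_self) = map of the bound formula
theorem A_branch (mk : Int → Int → List Int) (size offset last n : Int)
    (hlast : last = offset + size) :
    (PySem.List.pyRange 0 n 1).foldl (fun acc i =>
      acc ++ [mk (PySem.Int.floordiv (i * size) n + offset)
                 (if i = n - 1 then last else PySem.Int.floordiv ((i + 1) * size) n + offset)]) []
    = (PySem.List.pyRange 0 n 1).map
        (fun i => mk (PySem.Int.floordiv (i * size) n + offset)
                     (PySem.Int.floordiv ((i + 1) * size) n + offset)) := by
  rw [PySem.List.foldl_append_singleton_eq_map, List.nil_append]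
  apply List.map_congr_left
  intro i hi
  rw [PySem.List.mem_pyRange_one] at hi
  by_cases hl : i = n - 1
  · rw [if_pos hl, hl]
    have hn : 0 < n := by omega
    have : n - 1 + 1 = n := by ring
    rw [this, floordiv_mul_self n size hn, hlast]
    ring_nf
  · rw [if_neg hl]

-- B's accumulator loop produces the same boxes, by the invariant
-- start = floordiv (j*size) n + offset, acc = mod (j*size) n
theorem B_loop (mk : Int → Int → List Int) (size offset n : Int) (hn : 0 < n) :
    ∀ (m : Nat) (j : Int), 0 ≤ j → n = j + m → ∀ (acc0 : List (List Int)),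
    ((PySem.List.pyRange j n 1).foldl (fun (st : Int × Int × List (List Int)) (_ : Int) =>
        let acc := st.2.1 + size
        let step := PySem.Int.floordiv acc n
        let acc := PySem.Int.mod acc n
        let end_ := st.1 + step
        (end_, acc, st.2.2 ++ [mk st.1 end_]))
      (PySem.Int.floordiv (j * size) n + offset, PySem.Int.mod (j * size) n, acc0)).2.2
    = acc0 ++ (PySem.List.pyRange j n 1).map
        (fun i => mk (PySem.Int.floordiv (i * size) n + offset)
                     (PySem.Int.floordiv ((i + 1) * size) n + offset)) := by
  intro m
  induction m with
  | zero =>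
    intro j hj hm acc0
    rw [PySem.List.pyRange_one_eq_nil (by omega)]
    simp
  | succ k ih =>
    intro j hj hm acc0
    have hjn : j < n := by push_cast at hm; omega
    rw [PySem.List.pyRange_one_cons hjn]
    simp only [List.foldl_cons, List.map_cons]
    rw [pv_step_div size n j hn, pv_step_mod size n j hn]
    have harg : PySem.Int.floordiv (j * size) n + offset +
        (PySem.Int.floordiv ((j + 1) * size) n - PySem.Int.floordiv (j * size) n)
        = PySem.Int.floordiv ((j + 1) * size) n + offset := by ring
    rw [harg]
    rw [ih (j + 1) (by omega) (by push_cast at hm ⊢; omega)]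
    simp

-- combined: A's loop = B's accumulator loop, one dimension branch
theorem AB_branch (mk : Int → Int → List Int) (size offset last n : Int)
    (hlast : last = offset + size) :
    (PySem.List.pyRange 0 n 1).foldl (fun acc i =>
      acc ++ [mk (PySem.Int.floordiv (i * size) n + offset)
                 (if i = n - 1 then last else PySem.Int.floordiv ((i + 1) * size) n + offset)]) []
    = ((PySem.List.pyRange 0 n 1).foldl (fun (st : Int × Int × List (List Int)) (_ : Int) =>
        let acc := st.2.1 + size
        let step := PySem.Int.floordiv acc n
        let acc := PySem.Int.mod acc n
        let end_ := st.1 + step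
        (end_, acc, st.2.2 ++ [mk st.1 end_]))
      (offset, 0, [])).2.2 := by
  rw [A_branch mk size offset last n hlast]
  by_cases hn : n ≤ 0
  · rw [PySem.List.pyRange_one_eq_nil hn]
    simp
  · replace hn : 0 < n := by omega
    have hfd0 : PySem.Int.floordiv 0 n = 0 := by
      rw [PySem.Int.floordiv_eq_iff_of_pos hn]; constructor <;> nlinarith
    have hmod0 : PySem.Int.mod 0 n = 0 := by
      have := PySem.Int.floordiv_mul_add_mod 0 n
      rw [hfd0] at this; linarith
    have hb := B_loop mk size offset n hn n.toNat 0 le_rfl (by omega) []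
    simp only [zero_mul, hfd0, hmod0, zero_add, List.nil_append] at hb
    exact hb.symm

-- ===== VERDICT (by name: the statement is the Claim_ definition above) =====
theorem split_box2sub_boxes_old_spec : Claim_equal_split_box2sub_boxes_old := by
  intro box range_window azimuth_window num_split dimension _ hpre
  unfold Spec_split_box2sub_boxes_old split_box2sub_boxes_old split_box2sub_boxes_old_alt
  by_cases hdim : dimension = "y"
  · simp only [hdim, beq_self_eq_true, if_pos]
    exact AB_branch
      (fun s e => [PySem.List.pyGetD box 0 0, s, PySem.List.pyGetD box 2 0, e])
      _ _ _ _ (by ring)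
  · simp only [hdim, if_false, beq_iff_eq]
    exact AB_branch
      (fun s e => [s, PySem.List.pyGetD box 1 0, e, PySem.List.pyGetD box 3 0])
      _ _ _ _ (by ring)
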